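-- pv_equiv track=rewrite | github.com/datahub-project/datahub | metadata-ingestion/src/datahub/ingestion/source/snowflake/snowflake_utils.py | _split_qualified_name
-- ===== SOURCE A (Python) =====
-- from typing import ClassVar, List, Literal, Optional, Tuple
--
-- def _split_qualified_name(qualified_name: str) -> List[str]:
--     """
--     Split a qualified name into its constituent parts.
--
--     >>> _split_qualified_name("db.my_schema.my_table")
--     ['db', 'my_schema', 'my_table']
--     >>> _split_qualified_name('"db"."my_schema"."my_table"')
--     ['db', 'my_schema', 'my_table']
--     >>> _split_qualified_name('TEST_DB.TEST_SCHEMA."TABLE.WITH.DOTS"')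
--     ['TEST_DB', 'TEST_SCHEMA', 'TABLE.WITH.DOTS']
--     >>> _split_qualified_name('TEST_DB."SCHEMA.WITH.DOTS".MY_TABLE')
--     ['TEST_DB', 'SCHEMA.WITH.DOTS', 'MY_TABLE']
--     """
--
--     # Fast path - no quotes.
--     if '"' not in qualified_name:
--         return qualified_name.split(".")
--
--     # First pass - split on dots that are not inside quotes.
--     in_quote = False
--     parts: List[List[str]] = [[]]
--     for char in qualified_name:
--         if char == '"':
--             in_quote = not in_quote
--         elif char == "." and not in_quote:
--             parts.append([])
--         else:
--             parts[-1].append(char)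
--
--     # Second pass - remove outer pairs of quotes.
--     result = []
--     for part in parts:
--         if len(part) > 2 and part[0] == '"' and part[-1] == '"':
--             part = part[1:-1]
--
--         result.append("".join(part))
--
--     return result
-- ===== SOURCE B (Python) =====
-- def _split_qualified_name(qualified_name):
--     segments = qualified_name.split('"')
--     parts = [""]
--     for i, segment in enumerate(segments):
--         if i % 2 == 0:
--             pieces = segment.split(".")
--             parts[-1] += pieces[0]
--             parts.extend(pieces[1:])
--         else:
--             parts[-1] += segment
--     return parts
-- ===== Notes on version B (the rewrite author's own statement) =====
-- stated objective: idiomatic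
-- what changed: Replaces the character-by-character in_quote state machine plus a dead quote-stripping second pass with a single split on the quote character whose segment parity gives the quote state: even segments are split on dots, odd segments are appended verbatim.
import Mathlib
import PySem

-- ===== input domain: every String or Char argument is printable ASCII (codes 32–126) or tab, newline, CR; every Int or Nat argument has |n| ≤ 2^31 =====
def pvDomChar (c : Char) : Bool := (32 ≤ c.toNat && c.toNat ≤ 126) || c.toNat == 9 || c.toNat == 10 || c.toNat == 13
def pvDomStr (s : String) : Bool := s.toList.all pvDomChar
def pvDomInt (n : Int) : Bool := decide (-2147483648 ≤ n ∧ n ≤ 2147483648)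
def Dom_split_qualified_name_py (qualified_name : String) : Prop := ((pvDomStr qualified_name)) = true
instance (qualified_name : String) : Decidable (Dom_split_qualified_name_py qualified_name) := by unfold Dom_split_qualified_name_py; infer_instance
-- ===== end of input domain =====

-- B replaces A's character-level in_quote state machine (plus its dead quote-stripping second pass)
-- by splitting on the quote character and using segment parity as the quote state; plainer structure.


-- ===== PORT A =====
-- loop body of A's first pass: state = (in_quote, parts); parts[-1].append(ch) / parts.append([])
def stepA (st : Bool × List (List Char)) (ch : Char) : Bool × List (List Char) :=
  if ch == '"' then (!st.1, st.2)
  else if ch == '.' && !st.1 then (st.1, st.2 ++ [[]])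
  else (st.1, st.2.dropLast ++ [(st.2.getLast?.getD []) ++ [ch]])

def split_qualified_name_py (qualified_name : String) : List String :=
  -- Fast path - no quotes.
  if PySem.Str.isIn "\"" qualified_name = false then
    (PySem.Chars.splitOn qualified_name.toList ['.']).map String.ofList
  else
    -- First pass - split on dots that are not inside quotes.
    -- Second pass - remove outer pairs of quotes.
    (qualified_name.toList.foldl stepA (false, [[]])).2.map (fun part =>
      String.ofList (if decide (2 < part.length) && (part.head? == some '"') && (part.getLast? == some '"')
        then PySem.List.slice part (some 1) (some (-1)) else part))

-- ===== PORT B =====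
-- loop body of B: for (i, segment) in enumerate(segments)
def stepB (parts : List (List Char)) (iseg : Int × List Char) : List (List Char) :=
  if PySem.Int.mod iseg.1 2 == 0 then
    let pieces := PySem.Chars.splitOn iseg.2 ['.']
    (parts.dropLast ++ [(parts.getLast?.getD []) ++ pieces.headD []]) ++ pieces.tail
  else
    parts.dropLast ++ [(parts.getLast?.getD []) ++ iseg.2]

def split_qualified_name_py_alt (qualified_name : String) : List String :=
  ((PySem.List.enumerate (PySem.Chars.splitOn qualified_name.toList ['"'])).foldl stepB
    [[]]).map String.ofList

-- ===== PRECONDITION & SPEC =====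
def Spec_split_qualified_name_py (qualified_name : String) (out : List String) : Prop := out = split_qualified_name_py_alt qualified_name
instance (qualified_name : String) (out : List String) : Decidable (Spec_split_qualified_name_py qualified_name out) := by unfold Spec_split_qualified_name_py; infer_instance

-- ===== CLAIM (what is proved, stated in full; the proofs are below) =====
def Claim_equal_split_qualified_name_py : Prop := ∀ (qualified_name : String), Dom_split_qualified_name_py qualified_name → Spec_split_qualified_name_py qualified_name (split_qualified_name_py qualified_name)

-- ===== LEMMAS AND PROOFS =====

-- split a char list on a single separator char, head-first
def mySplit (q : Char) : List Char → List (List Char)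
  | [] => [[]]
  | c :: cs => if c == q then [] :: mySplit q cs else (mySplit q cs).modifyHead (c :: ·)

-- the functional spec of A's state machine, head-first
def M : Bool → List Char → List (List Char)
  | _, [] => [[]]
  | b, c :: cs =>
    if c == '"' then M (!b) cs
    else if c == '.' && !b then [] :: M b cs
    else (M b cs).modifyHead (c :: ·)

-- append qs onto ps: last part of ps is glued to the first part of qs
def glue (ps qs : List (List Char)) : List (List Char) :=
  ps.dropLast ++ qs.modifyHead ((ps.getLast?.getD []) ++ ·)

-- B's processing of the segment list, by parity
def G : Nat → List (List Char) → List (List Char)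
  | _, [] => [[]]
  | p, s :: segs => if p % 2 = 0 then glue (mySplit '.' s) (G 1 segs) else glue [s] (G 0 segs)

theorem mySplit_ne_nil (q : Char) (l : List Char) : mySplit q l ≠ [] := by
  cases l with
  | nil => simp [mySplit]
  | cons c cs =>
    simp only [mySplit]
    split
    · simp
    · cases h : mySplit q cs with
      | nil => exact absurd h (mySplit_ne_nil q cs)
      | cons a t => simp

theorem M_ne_nil (b : Bool) (l : List Char) : M b l ≠ [] := by
  induction l generalizing b with
  | nil => simp [M]
  | cons c cs ih =>
    simp only [M]
    split
    · exact ih _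
    · split
      · simp
      · cases h : M b cs with
        | nil => exact absurd h (ih b)
        | cons a t => simp

theorem modifyHead_fun_id (X : List (List Char)) : X.modifyHead (fun x => x) = X := by
  cases X <;> simp

theorem glue_nil (X : List (List Char)) : glue [] X = X := by
  cases X <;> simp [glue]

theorem glue_start (X : List (List Char)) : glue [[]] X = X := by
  cases X <;> simp [glue]

theorem glue_singleton (h : List Char) (Y : List (List Char)) :
    glue [h] Y = Y.modifyHead (h ++ ·) := by
  simp [glue]

theorem glue_cons (p : List Char) (X Y : List (List Char)) (hX : X ≠ []) :
    glue (p :: X) Y = p :: glue X Y := by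
  cases X with
  | nil => exact absurd rfl hX
  | cons a t => simp [glue]

theorem glue_ne_nil (ps qs : List (List Char)) (hq : qs ≠ []) : glue ps qs ≠ [] := by
  cases qs with
  | nil => exact absurd rfl hq
  | cons a t => simp [glue]

theorem glue_nil_singleton (ps : List (List Char)) (hp : ps ≠ []) : glue ps [[]] = ps := by
  simp [glue, List.getLast?_eq_some_getLast hp, List.dropLast_concat_getLast hp]

theorem glue_modifyHead (p : List Char) (ps qs : List (List Char)) (hp : ps ≠ []) (hq : qs ≠ []) :
    glue (ps.modifyHead (p ++ ·)) qs = (glue ps qs).modifyHead (p ++ ·) := by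
  cases ps with
  | nil => exact absurd rfl hp
  | cons h t =>
    cases t with
    | nil =>
      cases qs with
      | nil => exact absurd rfl hq
      | cons a r => simp [glue, List.append_assoc]
    | cons h2 t2 =>
      rw [List.modifyHead_cons, glue_cons (p ++ h) (h2 :: t2) qs (by simp),
        glue_cons h (h2 :: t2) qs (by simp), List.modifyHead_cons]

theorem glue_assoc (ps qs rs : List (List Char)) (hq : qs ≠ []) (hr : rs ≠ []) :
    glue (glue ps qs) rs = glue ps (glue qs rs) := by
  induction ps with
  | nil => rw [glue_nil, glue_nil]
  | cons p t ih =>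
    cases t with
    | nil =>
      rw [glue_singleton, glue_singleton, glue_modifyHead _ _ _ hq hr]
    | cons h2 t2 =>
      rw [glue_cons p (h2 :: t2) qs (by simp),
        glue_cons p (glue (h2 :: t2) qs) rs (glue_ne_nil _ _ hq),
        glue_cons p (h2 :: t2) (glue qs rs) (by simp), ih]

theorem G_ne_nil (p : Nat) (segs : List (List Char)) : G p segs ≠ [] := by
  cases segs with
  | nil => simp [G]
  | cons s t =>
    simp only [G]
    split <;> exact glue_ne_nil _ _ (G_ne_nil _ t)

-- characterization of the raw splitOn worker for a single-char separator
theorem go_eq (q : Char) (fuel : Nat) :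
    ∀ (l cur : List Char) (accs : List (List Char)), l.length < fuel →
      PySem.Chars.splitOn.go [q] fuel l cur accs =
        accs.reverse ++ (mySplit q l).modifyHead (cur.reverse ++ ·) := by
  induction fuel with
  | zero => intro l cur accs h; exact absurd h (by omega)
  | succ f ih =>
    intro l cur accs h
    cases l with
    | nil => simp [PySem.Chars.splitOn.go, mySplit]
    | cons c rest =>
      rw [PySem.Chars.splitOn.go]
      by_cases hc : c = q
      · subst hc
        simp only [List.isPrefixOf, beq_self_eq_true, Bool.true_and, if_pos]
        rw [ih _ _ _ (by simpa using Nat.lt_of_succ_lt_succ h)]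
        simp [mySplit, modifyHead_fun_id]
      · have hpre : [q].isPrefixOf (c :: rest) = false := by
          simp [List.isPrefixOf]; exact fun hq => absurd hq.symm hc
        rw [if_neg (by simp [hpre])]
        rw [ih _ _ _ (Nat.lt_of_succ_lt_succ h)]
        simp only [mySplit, if_neg (by simp [hc] : ¬ (c == q) = true)]
        obtain ⟨a, t, hm⟩ : ∃ a t, mySplit q rest = a :: t := by
          cases hm : mySplit q rest with
          | nil => exact absurd hm (mySplit_ne_nil q rest)
          | cons a t => exact ⟨a, t, rfl⟩
        simp [hm, List.append_assoc]

theorem splitOn_eq_mySplit (q : Char) (l : List Char) :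
    PySem.Chars.splitOn l [q] = mySplit q l := by
  rw [PySem.Chars.splitOn, go_eq q (l.length + 1) l [] [] (by omega)]
  simp [modifyHead_fun_id]

theorem glue_empty_cons (ps X : List (List Char)) (hp : ps ≠ []) :
    glue ps ([] :: X) = ps ++ X := by
  simp only [glue, List.modifyHead_cons, List.append_nil]
  rw [List.getLast?_eq_some_getLast hp]
  conv_rhs => rw [← List.dropLast_concat_getLast hp]
  simp

theorem glue_snoc_empty (ps X : List (List Char)) : glue (ps ++ [[]]) X = ps ++ X := by
  simp only [glue, List.dropLast_concat, List.getLast?_concat, Option.getD_some]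
  simp [modifyHead_fun_id]

theorem glue_append_last (ps X : List (List Char)) (p : List Char) :
    glue (ps.dropLast ++ [(ps.getLast?.getD []) ++ p]) X = glue ps (X.modifyHead (p ++ ·)) := by
  simp only [glue, List.dropLast_concat, List.getLast?_concat, Option.getD_some]
  cases X <;> simp [List.append_assoc]

-- A's first-pass fold computes M
theorem foldA_eq (cs : List Char) : ∀ (b : Bool) (ps : List (List Char)), ps ≠ [] →
    (cs.foldl stepA (b, ps)).2 = glue ps (M b cs) := by
  induction cs with
  | nil => intro b ps hp; simp [M, glue_nil_singleton ps hp]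
  | cons c rest ih =>
    intro b ps hp
    rw [List.foldl_cons]
    by_cases h1 : c = '"'
    · subst h1
      simp only [stepA, beq_self_eq_true, if_pos]
      rw [ih (!b) ps hp]
      simp [M]
    · by_cases h2 : (c == '.' && !b) = true
      · have hA : stepA (b, ps) c = (b, ps ++ [[]]) := by
          simp [stepA, h1, h2]
        rw [hA, ih b (ps ++ [[]]) (by simp)]
        rw [glue_snoc_empty]
        have hM : M b (c :: rest) = [] :: M b rest := by
          simp only [M]
          rw [if_neg (by simp [h1]), if_pos h2]
        rw [hM, glue_empty_cons _ _ hp]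
      · have hA : stepA (b, ps) c =
            (b, ps.dropLast ++ [(ps.getLast?.getD []) ++ [c]]) := by
          simp only [stepA]
          rw [if_neg (by simp [h1]), if_neg h2]
        rw [hA, ih b _ (by simp), glue_append_last ps _ [c]]
        have hM : M b (c :: rest) = (M b rest).modifyHead (c :: ·) := by
          simp only [M]
          rw [if_neg (by simp [h1]), if_neg h2]
        rw [hM]
        rfl

-- parts produced by M never contain a quote character
theorem M_no_quote (cs : List Char) : ∀ (b : Bool), ∀ part ∈ M b cs, '"' ∉ part := by
  induction cs with
  | nil => intro b part hp; simp [M] at hp; simp [hp]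
  | cons c rest ih =>
    intro b part hp
    simp only [M] at hp
    by_cases h1 : c = '"'
    · rw [if_pos (by simp [h1])] at hp
      exact ih (!b) part hp
    · rw [if_neg (by simp [h1])] at hp
      by_cases h2 : (c == '.' && !b) = true
      · rw [if_pos h2] at hp
        rcases List.mem_cons.1 hp with h | h
        · simp [h]
        · exact ih b part h
      · rw [if_neg h2] at hp
        obtain ⟨a, t, hm⟩ : ∃ a t, M b rest = a :: t := by
          cases hm : M b rest with
          | nil => exact absurd hm (M_ne_nil b rest)
          | cons a t => exact ⟨a, t, rfl⟩
        rw [hm, List.modifyHead_cons] at hp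
        rcases List.mem_cons.1 hp with h | h
        · subst h
          intro hmem
          rcases List.mem_cons.1 hmem with h | h
          · exact h1 h.symm
          · exact ih b a (hm ▸ List.mem_cons_self) h
        · exact ih b part (hm ▸ List.mem_cons_of_mem a h)

-- B's fold over the enumerated segments computes G
theorem foldB_eq (segs : List (List Char)) : ∀ (n : Nat) (ps : List (List Char)), ps ≠ [] →
    ((PySem.List.enumerate segs (n : Int)).foldl stepB ps) = glue ps (G (n % 2) segs) := by
  induction segs with
  | nil => intro n ps hp; simp [PySem.List.enumerate, G, glue_nil_singleton ps hp]
  | cons s t ih =>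
    intro n ps hp
    rw [show PySem.List.enumerate (s :: t) (n : Int) =
        ((n : Int), s) :: PySem.List.enumerate t ((n : Int) + 1) from rfl, List.foldl_cons]
    have hcast : ((n : Int) + 1) = ((n + 1 : Nat) : Int) := by push_cast; ring
    have hmod : PySem.Int.mod (n : Int) 2 = ((n % 2 : Nat) : Int) := by
      exact_mod_cast PySem.Int.mod_natCast n 2
    rcases Nat.mod_two_eq_zero_or_one n with hn | hn
    · have hcond : (PySem.Int.mod (n : Int) 2 == 0) = true := by
        rw [hmod, hn]; rfl
      obtain ⟨a, t', hm⟩ : ∃ a t', PySem.Chars.splitOn s ['.'] = a :: t' := by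
        rw [splitOn_eq_mySplit]
        cases hm : mySplit '.' s with
        | nil => exact absurd hm (mySplit_ne_nil '.' s)
        | cons a t' => exact ⟨a, t', rfl⟩
      have hstep : stepB ps ((n : Int), s) = glue ps (mySplit '.' s) := by
        simp only [stepB, hcond, if_pos, hm]
        rw [← splitOn_eq_mySplit, hm]
        simp only [glue, List.headD_cons, List.tail_cons, List.modifyHead_cons]
        simp [List.append_assoc]
      rw [hstep, hcast, ih (n + 1) _ (glue_ne_nil _ _ (mySplit_ne_nil '.' s))]
      rw [glue_assoc ps _ _ (mySplit_ne_nil '.' s) (G_ne_nil _ t)]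
      have h1 : (n + 1) % 2 = 1 := by omega
      rw [h1]
      simp only [G, hn]
      rw [if_pos (by norm_num)]
    · have hcond : (PySem.Int.mod (n : Int) 2 == 0) = false := by
        rw [hmod, hn]; rfl
      have hstep : stepB ps ((n : Int), s) = glue ps [s] := by
        simp only [stepB, hcond, Bool.false_eq_true, glue]
        simp
      rw [hstep, hcast, ih (n + 1) _ (glue_ne_nil _ _ (by simp))]
      rw [glue_assoc ps _ _ (by simp) (G_ne_nil _ t)]
      have h1 : (n + 1) % 2 = 0 := by omega
      rw [h1]
      simp only [G, hn]
      rw [if_neg (by norm_num)]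

-- G over the quote-split segments is M
theorem modifyHead_cons_eq_append (c : Char) (X : List (List Char)) :
    X.modifyHead (c :: ·) = X.modifyHead ([c] ++ ·) := rfl

theorem G_eq_M (cs : List Char) :
    G 0 (mySplit '"' cs) = M false cs ∧ G 1 (mySplit '"' cs) = M true cs := by
  induction cs with
  | nil =>
    constructor <;> simp [mySplit, G, M, glue_start]
  | cons c rest ih =>
    by_cases h1 : c = '"'
    · subst h1
      have hm : mySplit '"' ('"' :: rest) = [] :: mySplit '"' rest := by
        simp [mySplit]
      have hM : ∀ b, M b ('"' :: rest) = M (!b) rest := by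
        intro b; simp [M]
      constructor
      · rw [hm, hM]
        show glue (mySplit '.' []) (G 1 (mySplit '"' rest)) = M (!false) rest
        rw [show mySplit '.' [] = [[]] from rfl, glue_start, ih.2]
        rfl
      · rw [hm, hM]
        show glue [[]] (G 0 (mySplit '"' rest)) = M (!true) rest
        rw [glue_start, ih.1]
        rfl
    · obtain ⟨a, t, hm⟩ : ∃ a t, mySplit '"' rest = a :: t := by
        cases hm : mySplit '"' rest with
        | nil => exact absurd hm (mySplit_ne_nil '"' rest)
        | cons a t => exact ⟨a, t, rfl⟩
      have hsplit : mySplit '"' (c :: rest) = (c :: a) :: t := by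
        simp only [mySplit]
        rw [if_neg (by simp [h1]), hm, List.modifyHead_cons]
      constructor
      · rw [hsplit]
        show glue (mySplit '.' (c :: a)) (G 1 t) = M false (c :: rest)
        by_cases hd : c = '.'
        · subst hd
          have : mySplit '.' ('.' :: a) = [] :: mySplit '.' a := by simp [mySplit]
          rw [this, glue_cons _ _ _ (mySplit_ne_nil '.' a)]
          have hG : glue (mySplit '.' a) (G 1 t) = G 0 (a :: t) := by
            simp only [G]; rw [if_pos (by norm_num)]
          rw [hG, ← hm, ih.1]
          simp [M]
        · have : mySplit '.' (c :: a) = (mySplit '.' a).modifyHead (c :: ·) := by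
            simp only [mySplit]; rw [if_neg (by simp [hd])]
          rw [this, modifyHead_cons_eq_append,
            glue_modifyHead [c] _ _ (mySplit_ne_nil '.' a) (G_ne_nil 1 t)]
          have hG : glue (mySplit '.' a) (G 1 t) = G 0 (a :: t) := by
            simp only [G]; rw [if_pos (by norm_num)]
          rw [hG, ← hm, ih.1]
          have hM : M false (c :: rest) = (M false rest).modifyHead (c :: ·) := by
            simp only [M]
            rw [if_neg (by simp [h1]), if_neg (by simp [hd])]
          rw [hM, modifyHead_cons_eq_append]
      · rw [hsplit]
        show glue [c :: a] (G 0 t) = M true (c :: rest)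
        have hM : M true (c :: rest) = (M true rest).modifyHead (c :: ·) := by
          simp only [M]
          rw [if_neg (by simp [h1]), if_neg (by simp)]
        have hih : glue [a] (G 0 t) = M true rest := by
          have : G 1 (a :: t) = glue [a] (G 0 t) := by
            simp only [G]; rw [if_neg (by norm_num)]
          rw [← this, ← hm, ih.2]
        rw [hM, ← hih, glue_singleton, glue_singleton]
        obtain ⟨g, gt, hg⟩ : ∃ g gt, G 0 t = g :: gt := by
          cases hg : G 0 t with
          | nil => exact absurd hg (G_ne_nil 0 t)
          | cons g gt => exact ⟨g, gt, rfl⟩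
        rw [hg]
        simp

theorem M_eq_mySplit_dot (cs : List Char) (h : '"' ∉ cs) : M false cs = mySplit '.' cs := by
  induction cs with
  | nil => rfl
  | cons c rest ih =>
    have hc : ¬ c = '"' := fun e => h (e ▸ List.mem_cons_self)
    have hrest : '"' ∉ rest := fun e => h (List.mem_cons_of_mem c e)
    simp only [M, mySplit]
    rw [if_neg (by simp [hc])]
    by_cases hd : c = '.'
    · rw [if_pos (by simp [hd]), if_pos (by simp [hd]), ih hrest]
    · rw [if_neg (by simp [hd]), if_neg (by simp [hd]), ih hrest]

theorem isIn_quote_mem (s : String) :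
    PySem.Str.isIn "\"" s = true ↔ '"' ∈ s.toList := by
  rw [PySem.Str.isIn_iff_infix]
  constructor
  · rintro ⟨u, v, h⟩
    rw [← h]; simp
  · intro hm
    obtain ⟨u, v, h⟩ := List.append_of_mem hm
    exact ⟨u, v, by rw [h]; simp⟩

theorem quoteCond_false (part : List Char) (h : '"' ∉ part) :
    (decide (2 < part.length) && (part.head? == some '"') && (part.getLast? == some '"')) = false := by
  cases part with
  | nil => rfl
  | cons a t =>
    have ha : ¬ a = '"' := fun e => h (e ▸ List.mem_cons_self)
    simp [ha]

theorem alt_eq_M (s : String) :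
    split_qualified_name_py_alt s = (M false s.toList).map String.ofList := by
  unfold split_qualified_name_py_alt
  have h := foldB_eq (PySem.Chars.splitOn s.toList ['"']) 0 [[]] (by simp)
  rw [show ((0 : Nat) : Int) = (0 : Int) from rfl] at h
  rw [h, glue_start, splitOn_eq_mySplit]
  rw [show (0 % 2) = 0 from rfl, (G_eq_M s.toList).1]

-- ===== VERDICT (by name: the statement is the Claim_ definition above) =====
theorem split_qualified_name_py_spec : Claim_equal_split_qualified_name_py := by
  intro s _
  unfold Spec_split_qualified_name_py
  rw [alt_eq_M]
  unfold split_qualified_name_py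
  split
  next hfast =>
    have hnot : '"' ∉ s.toList := fun hm => by
      rw [(isIn_quote_mem s).2 hm] at hfast
      exact absurd hfast (by simp)
    rw [splitOn_eq_mySplit, M_eq_mySplit_dot s.toList hnot]
  next hq =>
    rw [foldA_eq s.toList false [[]] (by simp), glue_start]
    apply List.map_congr_left
    intro part hpart
    rw [quoteCond_false part (M_no_quote s.toList false part hpart)]
    simp
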